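-- pv_equiv track=rewrite | github.com/durianh96/InvNet-GSM | utils/graph_algorithm_utils.py | find_weakly_connected_components
-- ===== SOURCE A (Python) =====
-- def find_adjs_of_node(edge_list: list):
--     nodes = set([node for tu in edge_list for node in tu])
--     adjs_of_node = {node: set() for node in nodes}
--     for i, j in edge_list:
--         adjs_of_node[i].add(j)
--         adjs_of_node[j].add(i)
--     return adjs_of_node
--
-- def find_connected(adj_dict, j):
--     visited = set()
--
--     def _dfs(node):
--         if node not in visited:
--             visited.add(node)
--             for adj in adj_dict[node]:
--                 _dfs(adj)
--
--     _dfs(j)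
--
--     return visited
--
-- def find_weakly_connected_components(all_nodes, edge_list):
--     nodes = set([i for i, _ in edge_list]) | set([j for _, j in edge_list])
--     visited = set()
--     components = []
--
--     single_nodes = all_nodes - nodes
--     if bool(single_nodes):
--         for k in single_nodes:
--             single_node = {k}
--             components.append((single_node, []))
--
--     adj_dict = find_adjs_of_node(edge_list)
--
--     for j in nodes:
--         if j not in visited:
--             connected_nodes = find_connected(adj_dict, j)
--             visited = visited | connected_nodes
--             sub_edge_list = [(i, j) for i, j in edge_list if ((i in connected_nodes) and (j in connected_nodes))]
--             components.append((connected_nodes, sub_edge_list))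
--
--     return components
-- ===== SOURCE B (Python) =====
-- def find_adjs_of_node(edge_list: list):
--     nodes = set([node for tu in edge_list for node in tu])
--     adjs_of_node = {node: set() for node in nodes}
--     for i, j in edge_list:
--         adjs_of_node[i].add(j)
--         adjs_of_node[j].add(i)
--     return adjs_of_node
--
--
-- def find_connected(adj_dict, j):
--     visited = set()
--
--     def _dfs(node):
--         if node not in visited:
--             visited.add(node)
--             for adj in adj_dict[node]:
--                 _dfs(adj)
--
--     _dfs(j)
--
--     return visited
--
--
-- def find_weakly_connected_components(all_nodes, edge_list):
--     nodes = set([i for i, _ in edge_list]) | set([j for _, j in edge_list])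
--     components = [({k}, []) for k in all_nodes - nodes]
--
--     adj_dict = find_adjs_of_node(edge_list)
--
--     # phase 1: discover each component once and label its nodes with its index
--     label = {}
--     comp_nodes = []
--     for j in nodes:
--         if j not in label:
--             connected = find_connected(adj_dict, j)
--             c = len(comp_nodes)
--             for u in connected:
--                 label[u] = c
--             comp_nodes.append(connected)
--
--     # phase 2: bucket the edges in one pass over edge_list
--     buckets = [[] for _ in comp_nodes]
--     for i, j in edge_list:
--         buckets[label[i]].append((i, j))
--
--     components.extend(zip(comp_nodes, buckets))
--     return components
-- ===== Notes on version B (the rewrite author's own statement) =====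
-- stated objective: faster
-- what changed: A rescans the whole edge_list once per component to build each component's edge sublist (O(C*E) besides the DFS); B keeps the same component discovery but labels every node with its component index once and then distributes the edges into per-component buckets in a single pass over edge_list (O(V+E)).
import Mathlib
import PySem

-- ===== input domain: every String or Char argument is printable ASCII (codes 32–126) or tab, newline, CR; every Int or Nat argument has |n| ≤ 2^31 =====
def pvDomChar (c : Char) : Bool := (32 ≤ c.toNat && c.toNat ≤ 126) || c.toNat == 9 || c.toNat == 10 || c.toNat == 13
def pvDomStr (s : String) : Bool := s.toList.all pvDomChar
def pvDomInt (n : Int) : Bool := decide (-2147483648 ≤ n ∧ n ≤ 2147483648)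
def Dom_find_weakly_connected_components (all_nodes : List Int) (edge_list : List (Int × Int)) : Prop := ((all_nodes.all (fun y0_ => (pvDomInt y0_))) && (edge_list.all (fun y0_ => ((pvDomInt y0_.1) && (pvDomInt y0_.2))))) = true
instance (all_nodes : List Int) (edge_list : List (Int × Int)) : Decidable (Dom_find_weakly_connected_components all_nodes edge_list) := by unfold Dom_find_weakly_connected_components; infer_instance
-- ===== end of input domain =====

-- ===== PORT A =====
-- Header: B replaces A's per-component rescan of edge_list by a one-pass bucketing of the
-- edges keyed by a node→component label; return-value equivalence only (no mutation involved).
-- Shared helpers (Source B keeps A's same-module helpers find_adjs_of_node / find_connected verbatim):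
def find_adjs_of_node (edge_list : List (Int × Int)) : PySem.Dict Int (PySem.Set Int) :=
  let nodes : PySem.Set Int := PySem.Set.ofList (edge_list.flatMap (fun tu => [tu.1, tu.2]))
  let adjs0 : PySem.Dict Int (PySem.Set Int) :=
    nodes.foldl (fun d node => d.insert node PySem.Set.empty) PySem.Dict.empty
  edge_list.foldl (fun d e =>
      (d.modify e.1 PySem.Set.empty (fun s => PySem.Set.add s e.2)).modify e.2 PySem.Set.empty
        (fun s => PySem.Set.add s e.1)) adjs0

-- Python's _dfs recursion, made total with a fuel bound (#keys + 1 always suffices: each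
-- nested call below an unvisited node has strictly more visited keys); otherwise literal.
def dfsVisit (adj : PySem.Dict Int (PySem.Set Int)) : Nat → Int → PySem.Set Int → PySem.Set Int
  | 0, _, visited => visited
  | fuel+1, node, visited =>
    if visited.contains node then visited
    else (adj.getD node PySem.Set.empty).foldl (fun v a => dfsVisit adj fuel a v)
          (PySem.Set.add visited node)

def find_connected (adj_dict : PySem.Dict Int (PySem.Set Int)) (j : Int) : PySem.Set Int :=
  dfsVisit adj_dict (adj_dict.items.length + 1) j PySem.Set.empty

def find_weakly_connected_components (all_nodes : List Int) (edge_list : List (Int × Int)) : List (List Int × (List (Int × Int))) :=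
  let nodes : PySem.Set Int :=
    PySem.Set.union (PySem.Set.ofList (edge_list.map (·.1))) (PySem.Set.ofList (edge_list.map (·.2)))
  let visited : PySem.Set Int := PySem.Set.empty
  let components : List (List Int × List (Int × Int)) := []
  let single_nodes : PySem.Set Int := PySem.Set.diff (PySem.Set.ofList all_nodes) nodes
  let components := if single_nodes ≠ [] then
      single_nodes.foldl (fun acc k => acc ++ [([k], [])]) components
    else components
  let adj_dict := find_adjs_of_node edge_list
  let st := nodes.foldl (fun (st : PySem.Set Int × List (List Int × List (Int × Int))) j =>
      if st.1.contains j then st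
      else
        let connected_nodes := find_connected adj_dict j
        (PySem.Set.union st.1 connected_nodes,
         st.2 ++ [(connected_nodes,
           edge_list.filter (fun e => connected_nodes.contains e.1 && connected_nodes.contains e.2))]))
    (visited, components)
  st.2

-- ===== PORT B =====
def find_weakly_connected_components_alt (all_nodes : List Int) (edge_list : List (Int × Int)) : List (List Int × (List (Int × Int))) :=
  let nodes : PySem.Set Int :=
    PySem.Set.union (PySem.Set.ofList (edge_list.map (·.1))) (PySem.Set.ofList (edge_list.map (·.2)))
  let components : List (List Int × List (Int × Int)) :=
    (PySem.Set.diff (PySem.Set.ofList all_nodes) nodes).map (fun k => ([k], []))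
  let adj_dict := find_adjs_of_node edge_list
  -- phase 1: discover each component once and label its nodes with its index
  let st := nodes.foldl (fun (st : PySem.Dict Int Int × List (PySem.Set Int)) j =>
      if st.1.contains j then st
      else
        let connected := find_connected adj_dict j
        let c : Int := st.2.length
        (connected.foldl (fun d u => d.insert u c) st.1, st.2 ++ [connected]))
    (PySem.Dict.empty, [])
  let label := st.1
  let comp_nodes := st.2
  -- phase 2: bucket the edges in one pass over edge_list (label lookup can never miss,
  -- and the bucket index is always in range; the getD/pyGetD/pySetD defaults are never used)
  let buckets : List (List (Int × Int)) := comp_nodes.map (fun _ => [])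
  let buckets := edge_list.foldl (fun bs e =>
      PySem.List.pySetD bs (label.getD e.1 0)
        (PySem.List.pyGetD bs (label.getD e.1 0) [] ++ [e])) buckets
  components ++ comp_nodes.zip buckets

-- ===== PRECONDITION & SPEC =====
def Spec_find_weakly_connected_components (all_nodes : List Int) (edge_list : List (Int × Int)) (out : List (List Int × (List (Int × Int)))) : Prop := out = find_weakly_connected_components_alt all_nodes edge_list
instance (all_nodes : List Int) (edge_list : List (Int × Int)) (out : List (List Int × (List (Int × Int)))) : Decidable (Spec_find_weakly_connected_components all_nodes edge_list out) := by unfold Spec_find_weakly_connected_components; infer_instance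

-- ===== CLAIM (what is proved, stated in full; the proofs are below) =====
def Claim_equal_find_weakly_connected_components : Prop := ∀ (all_nodes : List Int) (edge_list : List (Int × Int)), Dom_find_weakly_connected_components all_nodes edge_list → Spec_find_weakly_connected_components all_nodes edge_list (find_weakly_connected_components all_nodes edge_list)

-- ===== LEMMAS AND PROOFS =====

-- Proof-side helper vocabulary (adjacency as a function, reachability, DFS measure)
def pvAdjF (adj : PySem.Dict Int (PySem.Set Int)) (a : Int) : PySem.Set Int :=
  adj.getD a PySem.Set.empty

def pvAdj (adj : PySem.Dict Int (PySem.Set Int)) (a b : Int) : Prop := b ∈ pvAdjF adj a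

def pvReach (adj : PySem.Dict Int (PySem.Set Int)) : Int → Int → Prop :=
  Relation.ReflTransGen (pvAdj adj)

def pvUnvis (N : List Int) (v : PySem.Set Int) : Nat :=
  (N.filter (fun k => !PySem.Set.contains v k)).length

-- generic: a strictly poorer filter is strictly shorter
theorem pv_ncontains {s : PySem.Set Int} {x : Int} (h : PySem.Set.contains s x = false) :
    x ∉ s := fun hm => by rw [(PySem.Set.contains_iff s x).mpr hm] at h; cases h

theorem pv_filter_lt {l : List Int} {p q : Int → Bool}
    (himp : ∀ x, q x = true → p x = true) {r : Int} (hr : r ∈ l)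
    (hp : p r = true) (hq : q r = false) :
    (l.filter q).length < (l.filter p).length := by
  have hsub : (l.filter q).Sublist (l.filter p) := List.monotone_filter_right l himp
  have hmem : r ∈ l.filter p := List.mem_filter.mpr ⟨hr, hp⟩
  have hnm : r ∉ l.filter q := fun h => by simp [List.mem_filter, hq] at h
  rcases Nat.lt_or_ge (l.filter q).length (l.filter p).length with h | h
  · exact h
  · exact absurd (hsub.eq_of_length (Nat.le_antisymm hsub.length_le h) ▸ hmem) hnm
--ENDPROOF


theorem pvUnvis_mono {N : List Int} {v v' : PySem.Set Int}
    (h : ∀ x, x ∈ v → x ∈ v') : pvUnvis N v' ≤ pvUnvis N v := by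
  refine List.Sublist.length_le (List.monotone_filter_right N ?_)
  intro x hx
  simp only [Bool.not_eq_true'] at hx ⊢
  cases hvx : PySem.Set.contains v x with
  | false => rfl
  | true => exact absurd (h x ((PySem.Set.contains_iff v x).mp hvx)) (pv_ncontains hx)
--ENDPROOF


theorem pvUnvis_lt {N : List Int} {v : PySem.Set Int} {n : Int}
    (hn : n ∈ N) (hv : n ∉ v) : pvUnvis N (PySem.Set.add v n) < pvUnvis N v := by
  unfold pvUnvis
  apply pv_filter_lt (r := n) _ hn
  · simp only [Bool.not_eq_true']
    cases hvx : PySem.Set.contains v n with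
    | false => rfl
    | true => exact absurd ((PySem.Set.contains_iff v n).mp hvx) hv
  · simp [PySem.Set.contains_iff, PySem.Set.mem_add]
  · intro x hx
    simp only [Bool.not_eq_true'] at hx ⊢
    cases hvx : PySem.Set.contains v x with
    | false => rfl
    | true => exact absurd ((PySem.Set.mem_add v n x).mpr
        (Or.inl ((PySem.Set.contains_iff v x).mp hvx))) (pv_ncontains hx)
--ENDPROOF


theorem pv_dfs_mono (adj : PySem.Dict Int (PySem.Set Int)) :
    ∀ (fuel : Nat) (n : Int) (v : PySem.Set Int) (x : Int),
      x ∈ v → x ∈ dfsVisit adj fuel n v := by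
  intro fuel
  induction fuel with
  | zero => intro n v x hx; simpa [dfsVisit] using hx
  | succ fuel ih =>
    intro n v x hx
    simp only [dfsVisit]
    split
    · exact hx
    · have hadd : x ∈ PySem.Set.add v n := (PySem.Set.mem_add v n x).mpr (Or.inl hx)
      have hfold : ∀ (l : List Int) (acc : PySem.Set Int) (y : Int), y ∈ acc →
          y ∈ l.foldl (fun v a => dfsVisit adj fuel a v) acc := by
        intro l
        induction l with
        | nil => intro acc y hy; simpa using hy
        | cons a l ihl => intro acc y hy; exact ihl _ _ (ih a acc y hy)
      exact hfold _ _ _ hadd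
--ENDPROOF


theorem pv_dfs_sound (adj : PySem.Dict Int (PySem.Set Int)) :
    ∀ (fuel : Nat) (n : Int) (v : PySem.Set Int) (x : Int),
      x ∈ dfsVisit adj fuel n v → x ∈ v ∨ pvReach adj n x := by
  intro fuel
  induction fuel with
  | zero => intro n v x hx; exact Or.inl (by simpa [dfsVisit] using hx)
  | succ fuel ih =>
    intro n v x hx
    simp only [dfsVisit] at hx
    split at hx
    · exact Or.inl hx
    · have hfold : ∀ (l : List Int) (acc : PySem.Set Int),
          (∀ a ∈ l, pvAdj adj n a) →
          (∀ y ∈ acc, y ∈ v ∨ pvReach adj n y) →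
          ∀ y ∈ l.foldl (fun v a => dfsVisit adj fuel a v) acc, y ∈ v ∨ pvReach adj n y := by
        intro l
        induction l with
        | nil => intro acc _ hacc y hy; exact hacc y (by simpa using hy)
        | cons a l ihl =>
          intro acc hl hacc y hy
          refine ihl _ (fun b hb => hl b (List.mem_cons_of_mem _ hb)) ?_ y hy
          intro z hz
          rcases ih a acc z hz with hz' | hz'
          · exact hacc z hz'
          · exact Or.inr (Relation.ReflTransGen.head (hl a List.mem_cons_self) hz')
      refine hfold _ _ (fun a ha => ha) ?_ x hx
      intro y hy
      rcases (PySem.Set.mem_add v n y).mp hy with hy' | hy'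
      · exact Or.inl hy'
      · exact Or.inr (hy' ▸ Relation.ReflTransGen.refl)
--ENDPROOF


theorem pv_dfs_sat (adj : PySem.Dict Int (PySem.Set Int)) (N : List Int)
    (hN : ∀ a b, pvAdj adj a b → b ∈ N) :
    ∀ (fuel : Nat) (n : Int) (v : PySem.Set Int), pvUnvis N v < fuel → n ∈ N →
      n ∈ dfsVisit adj fuel n v ∧
      (∀ u, u ∈ dfsVisit adj fuel n v → u ∉ v →
        ∀ w, pvAdj adj u w → w ∈ dfsVisit adj fuel n v) := by
  intro fuel
  induction fuel with
  | zero => intro n v hlt _; omega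
  | succ fuel ih =>
    intro n v hlt hn
    simp only [dfsVisit]
    split
    · next hc =>
      exact ⟨(PySem.Set.contains_iff v n).mp hc, fun u hu hun _ _ => absurd hu hun⟩
    · next hc =>
      have hnv : n ∉ v := fun hm => hc ((PySem.Set.contains_iff v n).mpr hm)
      have hfold : ∀ (l : List Int) (acc : PySem.Set Int),
          (∀ a ∈ l, a ∈ N) → pvUnvis N acc < fuel →
          (∀ x ∈ acc, x ∈ l.foldl (fun v a => dfsVisit adj fuel a v) acc) ∧
          (∀ a ∈ l, a ∈ l.foldl (fun v a => dfsVisit adj fuel a v) acc) ∧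
          (∀ u ∈ l.foldl (fun v a => dfsVisit adj fuel a v) acc, u ∉ acc →
            ∀ w, pvAdj adj u w → w ∈ l.foldl (fun v a => dfsVisit adj fuel a v) acc) := by
        intro l
        induction l with
        | nil =>
          intro acc _ _
          exact ⟨fun x hx => by simpa using hx, fun a ha => absurd ha (List.not_mem_nil),
            fun u hu hun _ _ => absurd (by simpa using hu) hun⟩
        | cons a l ihl =>
          intro acc hal hacc
          have hm1 : pvUnvis N (dfsVisit adj fuel a acc) ≤ pvUnvis N acc :=
            pvUnvis_mono (fun x hx => pv_dfs_mono adj fuel a acc x hx)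
          obtain ⟨hmemA, hsatA⟩ := ih a acc hacc (hal a List.mem_cons_self)
          obtain ⟨hmono', hmem', hsat'⟩ := ihl (dfsVisit adj fuel a acc)
            (fun b hb => hal b (List.mem_cons_of_mem _ hb)) (lt_of_le_of_lt hm1 hacc)
          simp only [List.foldl_cons]
          refine ⟨fun x hx => hmono' x (pv_dfs_mono adj fuel a acc x hx), ?_, ?_⟩
          · intro b hb
            rcases List.mem_cons.mp hb with hb' | hb'
            · exact hb' ▸ hmono' a hmemA
            · exact hmem' b hb'
          · intro u hu hun w hw
            by_cases hu1 : u ∈ dfsVisit adj fuel a acc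
            · exact hmono' w (hsatA u hu1 hun w hw)
            · exact hsat' u hu hu1 w hw
      have hlt' : pvUnvis N (PySem.Set.add v n) < fuel :=
        lt_of_lt_of_le (pvUnvis_lt hn hnv) (by omega)
      obtain ⟨hmono', hmem', hsat'⟩ := hfold (adj.getD n PySem.Set.empty) (PySem.Set.add v n)
        (fun a ha => hN n a ha) hlt'
      refine ⟨hmono' n ((PySem.Set.mem_add v n n).mpr (Or.inr rfl)), ?_⟩
      intro u hu hun w hw
      by_cases hu0 : u ∈ PySem.Set.add v n
      · rcases (PySem.Set.mem_add v n u).mp hu0 with h | h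
        · exact absurd h hun
        · exact hmem' w (h ▸ hw)
      · exact hsat' u hu hu0 w hw
--ENDPROOF


theorem pv_fc_facts (adj : PySem.Dict Int (PySem.Set Int))
    (hN : ∀ a b, pvAdj adj a b → b ∈ adj.keys) (j : Int) (hj : j ∈ adj.keys) :
    j ∈ find_connected adj j ∧
    (∀ u, u ∈ find_connected adj j → ∀ w, pvAdj adj u w → w ∈ find_connected adj j) ∧
    (∀ u, u ∈ find_connected adj j → pvReach adj j u) := by
  have hlt : pvUnvis adj.keys PySem.Set.empty < adj.items.length + 1 := by
    have : pvUnvis adj.keys PySem.Set.empty ≤ adj.keys.length :=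
      List.length_filter_le _ _
    have hk : adj.keys.length = adj.items.length := by
      simp [PySem.Dict.keys]
    omega
  obtain ⟨hm, hs⟩ := pv_dfs_sat adj adj.keys hN (adj.items.length + 1) j PySem.Set.empty hlt hj
  refine ⟨hm, ?_, ?_⟩
  · intro u hu w hw
    exact hs u hu (List.not_mem_nil) w hw
  · intro u hu
    rcases pv_dfs_sound adj (adj.items.length + 1) j PySem.Set.empty u hu with h | h
    · exact absurd h (List.not_mem_nil)
    · exact h
--ENDPROOF


theorem pv_absorb (adj : PySem.Dict Int (PySem.Set Int)) (S : PySem.Set Int)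
    (hS : ∀ u, u ∈ S → ∀ w, pvAdj adj u w → w ∈ S) :
    ∀ a b, a ∈ S → pvReach adj a b → b ∈ S := by
  intro a b ha hr
  induction hr with
  | refl => exact ha
  | tail _ hbc ihr => exact hS _ ihr _ hbc
--ENDPROOF


theorem pv_reach_symm (adj : PySem.Dict Int (PySem.Set Int))
    (hsym : ∀ a b, pvAdj adj a b → pvAdj adj b a) :
    ∀ a b, pvReach adj a b → pvReach adj b a := by
  intro a b h
  exact Relation.ReflTransGen.symmetric (fun x y hxy => hsym x y hxy) h
--ENDPROOF


-- the one-step membership characterisation of the adjacency-building loop body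
theorem pv_step_mem (d : PySem.Dict Int (PySem.Set Int)) (i j a b : Int) :
    b ∈ ((d.modify i PySem.Set.empty (fun s => PySem.Set.add s j)).modify j PySem.Set.empty
          (fun s => PySem.Set.add s i)).getD a PySem.Set.empty ↔
      (b ∈ d.getD a PySem.Set.empty ∨ (a = i ∧ b = j) ∨ (a = j ∧ b = i)) := by
  simp only [PySem.Dict.getD_modify]
  split_ifs with h1 h2 <;> simp_all [PySem.Set.mem_add] <;> tauto
--ENDPROOF


theorem pv_step_contains (d : PySem.Dict Int (PySem.Set Int)) (i j x : Int) :
    ((d.modify i PySem.Set.empty (fun s => PySem.Set.add s j)).modify j PySem.Set.empty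
          (fun s => PySem.Set.add s i)).contains x = (x == j || x == i || d.contains x) := by
  simp only [PySem.Dict.contains_modify, Bool.or_assoc]
--ENDPROOF


-- the initial dict {node: set() for node in nodes}
theorem pv_init_getD (l : List Int) :
    ∀ (d : PySem.Dict Int (PySem.Set Int)),
      (∀ a, d.getD a PySem.Set.empty = PySem.Set.empty) →
      ∀ x, (l.foldl (fun d node => d.insert node PySem.Set.empty) d).getD x PySem.Set.empty
        = PySem.Set.empty := by
  intro d hd x
  induction l generalizing d with
  | nil => simpa using hd x
  | cons n l ihl =>
    simp only [List.foldl_cons]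
    refine ihl _ ?_
    intro a
    rw [PySem.Dict.getD_insert]
    split
    · rfl
    · exact hd a
--ENDPROOF


theorem pv_init_contains (l : List Int) :
    ∀ (d : PySem.Dict Int (PySem.Set Int)) (x : Int),
      (l.foldl (fun d node => d.insert node PySem.Set.empty) d).contains x
        = (d.contains x || l.contains x) := by
  intro d x
  induction l generalizing d with
  | nil => simp
  | cons n l ihl =>
    simp only [List.foldl_cons, ihl, PySem.Dict.contains_insert]
    simp only [List.contains_cons]
    cases d.contains x <;> cases hxn : x == n <;> simp
--ENDPROOF


-- the adjacency fold, all invariants at once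
theorem pv_build (el' : List (Int × Int)) :
    ∀ (d : PySem.Dict Int (PySem.Set Int)),
      (∀ e ∈ el', d.contains e.1 = true ∧ d.contains e.2 = true) →
      (∀ a b, b ∈ d.getD a PySem.Set.empty → a ∈ d.getD b PySem.Set.empty) →
      (∀ a b, b ∈ d.getD a PySem.Set.empty → d.contains b = true) →
      let d' := el'.foldl (fun d e =>
        (d.modify e.1 PySem.Set.empty (fun s => PySem.Set.add s e.2)).modify e.2 PySem.Set.empty
          (fun s => PySem.Set.add s e.1)) d
      (∀ x, d'.contains x = d.contains x) ∧
      (∀ a b, b ∈ d'.getD a PySem.Set.empty → a ∈ d'.getD b PySem.Set.empty) ∧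
      (∀ a b, b ∈ d'.getD a PySem.Set.empty → d'.contains b = true) ∧
      (∀ e ∈ el', e.2 ∈ d'.getD e.1 PySem.Set.empty) := by
  intro d hk hsym hvk
  induction el' generalizing d with
  | nil => exact ⟨fun x => rfl, hsym, hvk, by simp⟩
  | cons e el ihl =>
    simp only [List.foldl_cons]
    have hk1 : d.contains e.1 = true := (hk e List.mem_cons_self).1
    have hk2 : d.contains e.2 = true := (hk e List.mem_cons_self).2
    set d1 := (d.modify e.1 PySem.Set.empty (fun s => PySem.Set.add s e.2)).modify e.2
      PySem.Set.empty (fun s => PySem.Set.add s e.1) with hd1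
    have hcont : ∀ x, d1.contains x = d.contains x := by
      intro x
      rw [hd1, pv_step_contains]
      cases hx2 : x == e.2
      · cases hx1 : x == e.1
        · simp
        · simp [(by simpa using hx1 : x = e.1) ▸ hk1]
      · simp [(by simpa using hx2 : x = e.2) ▸ hk2]
    have hmem : ∀ a b, b ∈ d1.getD a PySem.Set.empty ↔
        (b ∈ d.getD a PySem.Set.empty ∨ (a = e.1 ∧ b = e.2) ∨ (a = e.2 ∧ b = e.1)) := by
      intro a b; rw [hd1]; exact pv_step_mem d e.1 e.2 a b
    obtain ⟨ic, isym, ivk, ie⟩ := ihl d1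
      (fun e' he' => by
        rw [hcont, hcont]
        exact hk e' (List.mem_cons_of_mem _ he'))
      (fun a b hb => by
        rw [hmem] at hb ⊢
        rcases hb with h | ⟨h1, h2⟩ | ⟨h1, h2⟩
        · exact Or.inl (hsym a b h)
        · exact Or.inr (Or.inr ⟨h2, h1⟩)
        · exact Or.inr (Or.inl ⟨h2, h1⟩))
      (fun a b hb => by
        rw [hmem] at hb
        rw [hcont]
        rcases hb with h | ⟨h1, h2⟩ | ⟨h1, h2⟩
        · exact hvk a b h
        · exact h2 ▸ hk2
        · exact h2 ▸ hk1)
    refine ⟨fun x => (ic x).trans (hcont x), isym, ivk, ?_⟩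
    intro e' he'
    rcases List.mem_cons.mp he' with he'' | he''
    · subst he''
      -- monotonicity: e'.2 ∈ d1.getD e'.1, and the fold only grows the sets
      have h1 : e'.2 ∈ d1.getD e'.1 PySem.Set.empty := by
        rw [hmem]; exact Or.inr (Or.inl ⟨rfl, rfl⟩)
      -- grow lemma inline
      have hgrow : ∀ (el'' : List (Int × Int)) (d' : PySem.Dict Int (PySem.Set Int)) (a b : Int),
          b ∈ d'.getD a PySem.Set.empty →
          b ∈ (el''.foldl (fun d e =>
            (d.modify e.1 PySem.Set.empty (fun s => PySem.Set.add s e.2)).modify e.2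
              PySem.Set.empty (fun s => PySem.Set.add s e.1)) d').getD a PySem.Set.empty := by
        intro el''
        induction el'' with
        | nil => intro d' a b hb; simpa using hb
        | cons e2 el2 ih2 =>
          intro d' a b hb
          simp only [List.foldl_cons]
          exact ih2 _ a b ((pv_step_mem d' e2.1 e2.2 a b).mpr (Or.inl hb))
      exact hgrow el d1 e'.1 e'.2 h1
    · exact ie e' he''
--ENDPROOF


-- facts about adj := find_adjs_of_node el
-- all facts about the constructed adjacency dict at once
theorem pv_adj_all (el : List (Int × Int)) :
    (∀ a b, pvAdj (find_adjs_of_node el) a b → pvAdj (find_adjs_of_node el) b a) ∧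
    (∀ a b, pvAdj (find_adjs_of_node el) a b → (find_adjs_of_node el).contains b = true) ∧
    (∀ e ∈ el, pvAdj (find_adjs_of_node el) e.1 e.2) ∧
    (∀ x, (find_adjs_of_node el).contains x = true ↔ x ∈ el.flatMap (fun tu => [tu.1, tu.2])) := by
  have hget0 : ∀ a, ((PySem.Set.ofList (el.flatMap (fun tu => [tu.1, tu.2]))).foldl
      (fun d node => d.insert node PySem.Set.empty) PySem.Dict.empty).getD a PySem.Set.empty
        = PySem.Set.empty :=
    pv_init_getD _ PySem.Dict.empty (fun _ => by simp [PySem.Dict.getD_empty])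
  have hcont0 : ∀ x, ((PySem.Set.ofList (el.flatMap (fun tu => [tu.1, tu.2]))).foldl
      (fun d node => d.insert node PySem.Set.empty)
      (PySem.Dict.empty : PySem.Dict Int (PySem.Set Int))).contains x = true
        ↔ x ∈ el.flatMap (fun tu => [tu.1, tu.2]) := by
    intro x
    rw [pv_init_contains]
    simp [PySem.Set.mem_ofList]
  obtain ⟨hc, hsym', hvk', hedge⟩ := pv_build el
    ((PySem.Set.ofList (el.flatMap (fun tu => [tu.1, tu.2]))).foldl
      (fun d node => d.insert node PySem.Set.empty) PySem.Dict.empty)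
    (fun e he => ⟨(hcont0 e.1).mpr (List.mem_flatMap.mpr ⟨e, he, by simp⟩),
                  (hcont0 e.2).mpr (List.mem_flatMap.mpr ⟨e, he, by simp⟩)⟩)
    (fun a b hb => by rw [hget0] at hb; cases hb)
    (fun a b hb => by rw [hget0] at hb; cases hb)
  have hdef : find_adjs_of_node el = el.foldl (fun d e =>
      (d.modify e.1 PySem.Set.empty (fun s => PySem.Set.add s e.2)).modify e.2 PySem.Set.empty
        (fun s => PySem.Set.add s e.1))
      ((PySem.Set.ofList (el.flatMap (fun tu => [tu.1, tu.2]))).foldl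
        (fun d node => d.insert node PySem.Set.empty) PySem.Dict.empty) := rfl
  refine ⟨?_, ?_, ?_, ?_⟩
  · intro a b h; unfold pvAdj pvAdjF at *; rw [hdef] at h ⊢; exact hsym' a b h
  · intro a b h; unfold pvAdj pvAdjF at h; rw [hdef] at h ⊢; exact hvk' a b h
  · intro e he; unfold pvAdj pvAdjF; rw [hdef]; exact hedge e he
  · intro x; rw [hdef, hc x]; exact hcont0 x
--ENDPROOF

theorem pv_adj_sym (el : List (Int × Int)) :
    ∀ a b, pvAdj (find_adjs_of_node el) a b → pvAdj (find_adjs_of_node el) b a := by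
  exact (pv_adj_all el).1
--ENDPROOF


theorem pv_adj_keys (el : List (Int × Int)) :
    ∀ a b, pvAdj (find_adjs_of_node el) a b → b ∈ (find_adjs_of_node el).keys := by
  intro a b h
  exact (PySem.Dict.contains_iff_mem_keys _ _).mp ((pv_adj_all el).2.1 a b h)
--ENDPROOF


theorem pv_adj_edge (el : List (Int × Int)) :
    ∀ e ∈ el, pvAdj (find_adjs_of_node el) e.1 e.2 := by
  exact (pv_adj_all el).2.2.1
--ENDPROOF


theorem pv_keys_iff (el : List (Int × Int)) :
    ∀ x, x ∈ (find_adjs_of_node el).keys ↔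
      x ∈ PySem.Set.union (PySem.Set.ofList (el.map (·.1))) (PySem.Set.ofList (el.map (·.2))) := by
  intro x
  rw [← PySem.Dict.contains_iff_mem_keys, (pv_adj_all el).2.2.2 x]
  simp only [PySem.Set.mem_union, PySem.Set.mem_ofList, List.mem_flatMap, List.mem_map,
    List.mem_cons, List.mem_singleton, List.not_mem_nil]
  constructor
  · rintro ⟨tu, htu, h | h | h⟩
    · exact Or.inl ⟨tu, htu, h.symm⟩
    · exact Or.inr ⟨tu, htu, h.symm⟩
    · cases h
  · rintro (⟨tu, htu, h⟩ | ⟨tu, htu, h⟩)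
    · exact ⟨tu, htu, Or.inl h.symm⟩
    · exact ⟨tu, htu, Or.inr (Or.inl h.symm)⟩
--ENDPROOF


-- the label-writing loop: every member of l gets value c, everything else is untouched
theorem pv_label_get (c : Int) :
    ∀ (l : List Int) (d : PySem.Dict Int Int) (x : Int),
      (l.foldl (fun d u => d.insert u c) d).get? x = if x ∈ l then some c else d.get? x := by
  intro l
  induction l with
  | nil => intro d x; simp
  | cons u l ihl =>
    intro d x
    simp only [List.foldl_cons, ihl]
    by_cases hxl : x ∈ l
    · simp [hxl]
    · by_cases hxu : x = u
      · simp [hxl, hxu, PySem.Dict.get?_insert]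
      · simp [hxl, hxu, PySem.Dict.get?_insert]
--ENDPROOF


-- phase 1: A's component loop and B's labelling loop, marched in lockstep
theorem pv_phase1 (adj : PySem.Dict Int (PySem.Set Int)) (el : List (Int × Int))
    (hN : ∀ a b, pvAdj adj a b → b ∈ adj.keys)
    (hsym : ∀ a b, pvAdj adj a b → pvAdj adj b a) :
    ∀ (ns : List Int), (∀ j ∈ ns, j ∈ adj.keys) →
    ∀ (v : PySem.Set Int) (L : List (PySem.Set Int)) (lab : PySem.Dict Int Int)
      (c0 : List (List Int × List (Int × Int))),
      (∀ x, lab.contains x = true ↔ x ∈ v) →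
      (∀ x, x ∈ v ↔ ∃ S ∈ L, x ∈ S) →
      (∀ S ∈ L, ∀ u ∈ S, ∀ w, pvAdj adj u w → w ∈ S) →
      (∀ (c : Nat) (hc : c < L.length), ∀ u ∈ L[c], lab.get? u = some (c : Int)) →
      let f : PySem.Set Int → List Int × List (Int × Int) := fun S =>
        (S, el.filter (fun e => PySem.Set.contains S e.1 && PySem.Set.contains S e.2))
      let stA := ns.foldl (fun st j =>
        if st.1.contains j then st
        else (PySem.Set.union st.1 (find_connected adj j),
          st.2 ++ [(find_connected adj j, el.filter (fun e =>
            PySem.Set.contains (find_connected adj j) e.1 &&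
            PySem.Set.contains (find_connected adj j) e.2))])) (v, c0 ++ L.map f)
      let stB := ns.foldl (fun st j =>
        if st.1.contains j then st
        else ((find_connected adj j).foldl (fun d u => d.insert u ((st.2.length : Int))) st.1,
          st.2 ++ [find_connected adj j])) (lab, L)
      stA.2 = c0 ++ stB.2.map f ∧
      (∀ x, stB.1.contains x = true ↔ x ∈ stA.1) ∧
      (∀ x, x ∈ stA.1 ↔ ∃ S ∈ stB.2, x ∈ S) ∧
      (∀ S ∈ stB.2, ∀ u ∈ S, ∀ w, pvAdj adj u w → w ∈ S) ∧
      (∀ (c : Nat) (hc : c < stB.2.length), ∀ u ∈ stB.2[c], stB.1.get? u = some (c : Int)) ∧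
      (∀ j ∈ ns, j ∈ stA.1) ∧ (∀ x ∈ v, x ∈ stA.1) := by
  intro ns
  induction ns with
  | nil =>
    intro hns v L lab c0 hlab hv hcl hval
    dsimp only [List.foldl_nil]
    exact ⟨rfl, hlab, hv, hcl, hval, fun j hj => absurd hj (List.not_mem_nil),
      fun x hx => hx⟩
  | cons j ns ih =>
    intro hns v L lab c0 hlab hv hcl hval
    dsimp only [List.foldl_cons]
    cases hjv : PySem.Set.contains v j with
    | true =>
      have hjl : lab.contains j = true := (hlab j).mpr ((PySem.Set.contains_iff v j).mp hjv)
      rw [if_pos rfl, if_pos hjl]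
      obtain ⟨h1, h2, h3, h4, h5, h6, h7⟩ :=
        ih (fun j' hj' => hns j' (List.mem_cons_of_mem _ hj')) v L lab c0 hlab hv hcl hval
      refine ⟨h1, h2, h3, h4, h5, ?_, h7⟩
      intro j' hj'
      rcases List.mem_cons.mp hj' with hj'' | hj''
      · subst hj''; exact h7 j' ((PySem.Set.contains_iff v j').mp hjv)
      · exact h6 j' hj''
    | false =>
      have hjnv : j ∉ v := pv_ncontains hjv
      have hjl : lab.contains j = false := by
        cases hl : lab.contains j
        · rfl
        · exact absurd ((hlab j).mp hl) hjnv
      rw [if_neg (by simp), if_neg (by simp [hjl])]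
      have hjk : j ∈ adj.keys := hns j List.mem_cons_self
      obtain ⟨hjc, hclconn, hsound⟩ := pv_fc_facts adj hN j hjk
      -- the new component is disjoint from every old one
      have hdisj : ∀ S ∈ L, ∀ u, u ∈ S → u ∉ find_connected adj j := by
        intro S hS u huS huc
        have hru : pvReach adj u j := pv_reach_symm adj hsym j u (hsound u huc)
        have hjS : j ∈ S := pv_absorb adj S (hcl S hS) u j huS hru
        exact hjnv ((hv j).mpr ⟨S, hS, hjS⟩)
      -- new invariants
      have hlab' : ∀ x, ((find_connected adj j).foldl
          (fun d u => d.insert u ((L.length : Int))) lab).contains x = true ↔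
            x ∈ PySem.Set.union v (find_connected adj j) := by
        intro x
        rw [PySem.Dict.contains_eq_isSome_get?, pv_label_get]
        by_cases hx : x ∈ find_connected adj j
        · simp [hx, PySem.Set.mem_union]
        · rw [if_neg hx, ← PySem.Dict.contains_eq_isSome_get?]
          rw [PySem.Set.mem_union]
          constructor
          · intro h; exact Or.inl ((hlab x).mp h)
          · rintro (h | h)
            · exact (hlab x).mpr h
            · exact absurd h hx
      have hv' : ∀ x, x ∈ PySem.Set.union v (find_connected adj j) ↔
          ∃ S ∈ L ++ [find_connected adj j], x ∈ S := by
        intro x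
        rw [PySem.Set.mem_union]
        constructor
        · rintro (h | h)
          · obtain ⟨S, hS, hxS⟩ := (hv x).mp h
            exact ⟨S, List.mem_append_left _ hS, hxS⟩
          · exact ⟨find_connected adj j, List.mem_append_right _ List.mem_cons_self, h⟩
        · rintro ⟨S, hS, hxS⟩
          rcases List.mem_append.mp hS with h | h
          · exact Or.inl ((hv x).mpr ⟨S, h, hxS⟩)
          · rw [List.mem_singleton.mp h] at hxS
            exact Or.inr hxS
      have hcl' : ∀ S ∈ L ++ [find_connected adj j], ∀ u ∈ S, ∀ w, pvAdj adj u w → w ∈ S := by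
        intro S hS
        rcases List.mem_append.mp hS with h | h
        · exact hcl S h
        · rw [List.mem_singleton.mp h]
          exact fun u hu w hw => hclconn u hu w hw
      have hval' : ∀ (c : Nat) (hc : c < (L ++ [find_connected adj j]).length),
          ∀ u ∈ (L ++ [find_connected adj j])[c],
            ((find_connected adj j).foldl
              (fun d u => d.insert u ((L.length : Int))) lab).get? u = some (c : Int) := by
        intro c hc u hu
        rw [pv_label_get]
        by_cases hcL : c < L.length
        · rw [List.getElem_append_left hcL] at hu
          rw [if_neg (fun hcon => hdisj _ (List.getElem_mem hcL) u hu hcon)]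
          exact hval c hcL u hu
        · have hceq : c = L.length := by
            simp only [List.length_append, List.length_singleton] at hc; omega
          subst hceq
          rw [List.getElem_concat_length] at hu
          rw [if_pos hu]
          rfl
      have e2 : (c0 ++ L.map (fun S =>
            (S, el.filter (fun e => PySem.Set.contains S e.1 && PySem.Set.contains S e.2)))) ++
            [(find_connected adj j, el.filter (fun e =>
              PySem.Set.contains (find_connected adj j) e.1 &&
              PySem.Set.contains (find_connected adj j) e.2))]
          = c0 ++ (L ++ [find_connected adj j]).map (fun S =>
            (S, el.filter (fun e => PySem.Set.contains S e.1 && PySem.Set.contains S e.2))) := by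
        simp [List.append_assoc]
      rw [e2]
      obtain ⟨h1, h2, h3, h4, h5, h6, h7⟩ :=
        ih (fun j' hj' => hns j' (List.mem_cons_of_mem _ hj'))
          (PySem.Set.union v (find_connected adj j)) (L ++ [find_connected adj j]) _ c0
          hlab' hv' hcl' hval'
      refine ⟨h1, h2, h3, h4, h5, ?_, ?_⟩
      · intro j' hj'
        rcases List.mem_cons.mp hj' with hj'' | hj''
        · subst hj''; exact h7 j' ((PySem.Set.mem_union v _ j').mpr (Or.inr hjc))
        · exact h6 j' hj''
      · intro x hx
        exact h7 x ((PySem.Set.mem_union v _ x).mpr (Or.inl hx))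
--ENDPROOF


-- pySetD at an in-range Nat index is List.set
theorem pv_pySetD_natCast {α : Type} (bs : List α) (c : Nat) (x : α) (h : c < bs.length) :
    PySem.List.pySetD bs (c : Int) x = bs.set c x := by
  have h' : (c : Int) < (bs.length : Int) := by exact_mod_cast h
  simp [PySem.List.pySetD, PySem.List.pySet?, PySem.List.pyIdx?, h']
--ENDPROOF


theorem pv_bucket_len (lab : PySem.Dict Int Int) (el' : List (Int × Int)) :
    ∀ (bs : List (List (Int × Int))),
      (el'.foldl (fun bs e =>
        PySem.List.pySetD bs (lab.getD e.1 0)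
          (PySem.List.pyGetD bs (lab.getD e.1 0) [] ++ [e])) bs).length = bs.length := by
  have hlen : ∀ (bs : List (List (Int × Int))) (i : Int) (v : List (Int × Int)),
      (PySem.List.pySetD bs i v).length = bs.length := by
    intro bs i v
    unfold PySem.List.pySetD PySem.List.pySet?
    cases PySem.List.pyIdx? bs.length i <;> simp
  induction el' with
  | nil => intro bs; rfl
  | cons e es ihe => intro bs; simp only [List.foldl_cons, ihe, hlen]
--ENDPROOF


-- phase 2: the one-pass bucketing fold produces exactly A's per-component filters
theorem pv_phase2 (lab : PySem.Dict Int Int) (L : List (PySem.Set Int)) :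
    ∀ (el' : List (Int × Int)) (bs : List (List (Int × Int))), bs.length = L.length →
      (∀ e ∈ el', ∃ c : Nat, c < L.length ∧ lab.getD e.1 0 = (c : Int) ∧
        (∀ c' : Nat, c' < L.length →
          ((PySem.Set.contains (L.getD c' []) e.1 && PySem.Set.contains (L.getD c' []) e.2) = true
            ↔ c' = c))) →
      ∀ (c : Nat), c < L.length →
        (el'.foldl (fun bs e =>
          PySem.List.pySetD bs (lab.getD e.1 0)
            (PySem.List.pyGetD bs (lab.getD e.1 0) [] ++ [e])) bs).getD c []
        = bs.getD c [] ++ el'.filter (fun e =>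
            PySem.Set.contains (L.getD c []) e.1 && PySem.Set.contains (L.getD c []) e.2) := by
  intro el'
  induction el' with
  | nil => intro bs hb hl c hc; simp
  | cons e es ihe =>
    intro bs hb hl c hc
    obtain ⟨ce, hce, hgetD, huniq⟩ := hl e List.mem_cons_self
    simp only [List.foldl_cons, hgetD]
    have hce' : ce < bs.length := by omega
    rw [PySem.List.pyGetD_natCast, pv_pySetD_natCast _ _ _ hce']
    have hres := ihe (bs.set ce (bs.getD ce [] ++ [e]))
      (by rw [List.length_set]; exact hb)
      (fun e' he' => hl e' (List.mem_cons_of_mem _ he')) c hc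
    rw [hres]
    have hbs' : (bs.set ce (bs.getD ce [] ++ [e])).getD c [] =
        if ce = c then bs.getD ce [] ++ [e] else bs.getD c [] := by
      by_cases h : ce = c
      · subst h; simp [List.getD_eq_getElem?_getD, List.getElem?_set, hce']
      · simp [List.getD_eq_getElem?_getD, List.getElem?_set, h]
    rw [hbs']
    by_cases hcc : c = ce
    · subst hcc
      have hpe : (PySem.Set.contains (L.getD c []) e.1 && PySem.Set.contains (L.getD c []) e.2)
          = true := (huniq c hc).mpr rfl
      simp only [List.filter_cons]
      rw [if_pos trivial, if_pos hpe]
      simp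
    · have hpe : (PySem.Set.contains (L.getD c []) e.1 && PySem.Set.contains (L.getD c []) e.2)
          = false := by
        cases hpb : (PySem.Set.contains (L.getD c []) e.1 && PySem.Set.contains (L.getD c []) e.2)
        · rfl
        · exact absurd ((huniq c hc).mp hpb) hcc
      simp only [List.filter_cons]
      rw [if_neg (Ne.symm hcc), if_neg (by rw [hpe]; exact Bool.false_ne_true)]
--ENDPROOF


-- the master equality
theorem pv_main (all_nodes : List Int) (edge_list : List (Int × Int)) :
    find_weakly_connected_components all_nodes edge_list
      = find_weakly_connected_components_alt all_nodes edge_list := by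
  have hsingle : ∀ (s : List Int),
      (if s ≠ [] then s.foldl (fun acc k => acc ++ [([k], ([] : List (Int × Int)))]) [] else [])
        = s.map (fun k => ([k], ([] : List (Int × Int)))) := by
    intro s
    by_cases h : s = []
    · simp [h]
    · rw [if_pos h, PySem.List.foldl_append_singleton_eq_map, List.nil_append]
  simp only [find_weakly_connected_components, find_weakly_connected_components_alt]
  rw [hsingle]
  have hzipmap : ∀ (l : List (PySem.Set Int)) (g : PySem.Set Int → List (Int × Int)),
      l.zip (l.map g) = l.map (fun S => (S, g S)) := by
    intro l g
    induction l with
    | nil => rfl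
    | cons a t iht => simp [iht]
  obtain ⟨h1, h2, h3, h4, h5, h6, h7⟩ :=
    pv_phase1 (find_adjs_of_node edge_list) edge_list (pv_adj_keys edge_list)
      (pv_adj_sym edge_list)
      ((PySem.Set.ofList (edge_list.map (fun x => x.1))).union
        (PySem.Set.ofList (edge_list.map (fun x => x.2))))
      (fun j hj => (pv_keys_iff edge_list j).mpr hj)
      PySem.Set.empty [] PySem.Dict.empty
      (((PySem.Set.ofList all_nodes).diff
        ((PySem.Set.ofList (edge_list.map (fun x => x.1))).union
          (PySem.Set.ofList (edge_list.map (fun x => x.2))))).map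
        (fun k => ([k], ([] : List (Int × Int)))))
      (by intro x; simp [PySem.Dict.contains_empty])
      (by intro x; simp)
      (by intro S hS; cases hS)
      (by intro c hc; cases (by simpa using hc : c < 0))
  rw [List.map_nil, List.append_nil] at h1
  -- names for the two final states
  set L' := (List.foldl
      (fun st j =>
        if st.1.contains j = true then st
        else
          (List.foldl (fun d u => d.insert u ((st.2.length : Int))) st.1
              (find_connected (find_adjs_of_node edge_list) j),
            st.2 ++ [find_connected (find_adjs_of_node edge_list) j]))
      (PySem.Dict.empty, [])
      ((PySem.Set.ofList (edge_list.map (fun x => x.1))).union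
        (PySem.Set.ofList (edge_list.map (fun x => x.2))))).2 with hLdef
  set lab' := (List.foldl
      (fun st j =>
        if st.1.contains j = true then st
        else
          (List.foldl (fun d u => d.insert u ((st.2.length : Int))) st.1
              (find_connected (find_adjs_of_node edge_list) j),
            st.2 ++ [find_connected (find_adjs_of_node edge_list) j]))
      (PySem.Dict.empty, [])
      ((PySem.Set.ofList (edge_list.map (fun x => x.1))).union
        (PySem.Set.ofList (edge_list.map (fun x => x.2))))).1 with hlabdef
  -- the phase-2 hypothesis: each edge has a well-defined component index
  have hl : ∀ e ∈ edge_list, ∃ c : Nat, c < L'.length ∧ lab'.getD e.1 0 = (c : Int) ∧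
      (∀ c' : Nat, c' < L'.length →
        ((PySem.Set.contains (L'.getD c' []) e.1 && PySem.Set.contains (L'.getD c' []) e.2) = true
          ↔ c' = c)) := by
    intro e he
    have he1n : e.1 ∈ (PySem.Set.ofList (edge_list.map (fun x => x.1))).union
        (PySem.Set.ofList (edge_list.map (fun x => x.2))) :=
      (PySem.Set.mem_union _ _ _).mpr (Or.inl ((PySem.Set.mem_ofList _ _).mpr
        (List.mem_map.mpr ⟨e, he, rfl⟩)))
    obtain ⟨S, hSL, hS1⟩ := (h3 e.1).mp (h6 e.1 he1n)
    obtain ⟨c, hc, hceq⟩ := List.getElem_of_mem hSL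
    have hgc : lab'.get? e.1 = some (c : Int) := h5 c hc e.1 (by rw [hceq]; exact hS1)
    refine ⟨c, hc, ?_, ?_⟩
    · rw [PySem.Dict.getD_eq_get?_getD, hgc]; rfl
    · intro c' hc'
      constructor
      · intro hb
        have hb1 : e.1 ∈ L'[c'] := by
          have hx := (Bool.and_eq_true _ _).mp hb |>.1
          rw [List.getD_eq_getElem _ _ hc'] at hx
          exact (PySem.Set.contains_iff _ _).mp hx
        have hgc' := h5 c' hc' e.1 hb1
        rw [hgc] at hgc'
        have hcast := Option.some.inj hgc'
        omega
      · rintro rfl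
        have he2 : e.2 ∈ L'[c'] := h4 (L'[c']) (List.getElem_mem hc') e.1
          (by rw [hceq]; exact hS1) e.2 (pv_adj_edge edge_list e he)
        rw [List.getD_eq_getElem _ _ hc']
        rw [Bool.and_eq_true]
        exact ⟨(PySem.Set.contains_iff _ _).mpr (by rw [hceq]; exact hS1),
               (PySem.Set.contains_iff _ _).mpr he2⟩
  -- the bucket fold computes exactly A's per-component filters
  have hbuckets : edge_list.foldl (fun bs e =>
        PySem.List.pySetD bs (lab'.getD e.1 0)
          (PySem.List.pyGetD bs (lab'.getD e.1 0) [] ++ [e])) (L'.map (fun _ => []))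
      = L'.map (fun S => edge_list.filter (fun e =>
          PySem.Set.contains S e.1 && PySem.Set.contains S e.2)) := by
    apply List.ext_getElem
    · rw [pv_bucket_len]; simp
    · intro i h1i h2i
      have hi : i < L'.length := by
        have := pv_bucket_len lab' edge_list (L'.map (fun _ => []))
        simp only [this, List.length_map] at h1i
        exact h1i
      have hp2 := pv_phase2 lab' L' edge_list (L'.map (fun _ => [])) (by simp) hl i hi
      rw [← List.getD_eq_getElem _ ([] : List (Int × Int)) h1i,
          ← List.getD_eq_getElem _ ([] : List (Int × Int)) h2i, hp2]
      have hi2 : i < (L'.map (fun S => edge_list.filter (fun e =>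
          PySem.Set.contains S e.1 && PySem.Set.contains S e.2))).length := by simpa using hi
      rw [List.getD_eq_getElem _ _ hi2, List.getElem_map, List.getD_eq_getElem _ _ hi]
      simp
  rw [h1, hbuckets, hzipmap]
--ENDPROOF


-- ===== VERDICT (by name: the statement is the Claim_ definition above) =====
theorem find_weakly_connected_components_spec : Claim_equal_find_weakly_connected_components := by
  intro all_nodes edge_list _
  exact pv_main all_nodes edge_list
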